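-- pv_equiv track=rewrite | github.com/daniil-gorbunov/algo-problems | algo-expert/hard/search_for_range/2.py | calcRangeBorder
-- ===== SOURCE A (Python) =====
-- def calcRangeBorder(arr, target, searchingLeft):
--     left, right = 0, len(arr) - 1
--     while left <= right:
--         mid = (left + right) // 2
--         foundBorder = (mid == 0 or arr[mid - 1] != target) if searchingLeft else (mid == len(arr) - 1 or arr[mid + 1] != target)
--         if arr[mid] == target and foundBorder:
--             return mid
--         shouldGoright = arr[mid] < target if searchingLeft else arr[mid] <= target
--         if shouldGoright:
--             left = mid + 1
--         else:
--             right = mid - 1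
--     return -1
-- ===== SOURCE B (Python) =====
-- def calcRangeBorder(arr, target, searchingLeft):
--     n = len(arr)
--
--     def helper(left, right):
--         if left > right:
--             return -1
--         mid = (left + right) // 2
--         if searchingLeft:
--             if arr[mid] == target and (mid == 0 or arr[mid - 1] != target):
--                 return mid
--             return helper(mid + 1, right) if arr[mid] < target else helper(left, mid - 1)
--         else:
--             if arr[mid] == target and (mid == n - 1 or arr[mid + 1] != target):
--                 return mid
--             return helper(mid + 1, right) if arr[mid] <= target else helper(left, mid - 1)
--
--     return helper(0, n - 1)
-- ===== Notes on version B (the rewrite author's own statement) =====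
-- stated objective: alternative
-- what changed: A's iterative while-loop mutating a (left,right) window is replaced by a recursive divide-and-conquer helper that branches once per call on searchingLeft and tail-recurses on the shrunken half.
import Mathlib
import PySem

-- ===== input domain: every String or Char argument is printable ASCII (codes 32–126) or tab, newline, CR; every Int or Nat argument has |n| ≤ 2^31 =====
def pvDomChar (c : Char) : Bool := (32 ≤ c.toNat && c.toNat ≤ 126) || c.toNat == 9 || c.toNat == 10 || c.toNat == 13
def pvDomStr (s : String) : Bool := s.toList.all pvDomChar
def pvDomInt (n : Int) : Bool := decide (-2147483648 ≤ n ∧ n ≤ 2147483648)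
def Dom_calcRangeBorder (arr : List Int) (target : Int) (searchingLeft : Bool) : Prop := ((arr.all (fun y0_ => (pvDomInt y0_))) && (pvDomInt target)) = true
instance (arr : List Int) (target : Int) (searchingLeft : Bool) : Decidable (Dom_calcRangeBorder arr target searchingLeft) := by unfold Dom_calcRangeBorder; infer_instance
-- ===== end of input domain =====

-- B restructures A's iterative while-loop as a recursive divide-and-conquer helper (same comparisons, same window); return-value equivalence, no mutation involved.

-- ===== PORT A =====
-- the while-loop of A: one fuel unit per loop-condition check; indices are provably in range, pyGetD 0 is A's arr[...]
def pvLoopA (arr : List Int) (target : Int) (searchingLeft : Bool) : Nat → Int → Int → Int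
  | 0, _, _ => -1
  | fuel+1, left, right =>
    if left ≤ right then
      let mid := PySem.Int.floordiv (left + right) 2
      if PySem.List.pyGetD arr mid 0 = target ∧
          (if searchingLeft then (mid = 0 ∨ PySem.List.pyGetD arr (mid - 1) 0 ≠ target)
           else (mid = (arr.length : Int) - 1 ∨ PySem.List.pyGetD arr (mid + 1) 0 ≠ target)) then mid
      else
        if (if searchingLeft then PySem.List.pyGetD arr mid 0 < target
            else PySem.List.pyGetD arr mid 0 ≤ target) then
          pvLoopA arr target searchingLeft fuel (mid + 1) right
        else
          pvLoopA arr target searchingLeft fuel left (mid - 1)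
    else -1

def calcRangeBorder (arr : List Int) (target : Int) (searchingLeft : Bool) : Int :=
  pvLoopA arr target searchingLeft (arr.length + 1) 0 ((arr.length : Int) - 1)

-- ===== PORT B =====
def pvHelperB (arr : List Int) (target : Int) (searchingLeft : Bool) (left right : Int) : Int :=
  if h : left > right then -1
  else
    let mid := PySem.Int.floordiv (left + right) 2
    if searchingLeft then
      if PySem.List.pyGetD arr mid 0 = target ∧ (mid = 0 ∨ PySem.List.pyGetD arr (mid - 1) 0 ≠ target) then mid
      else if PySem.List.pyGetD arr mid 0 < target then pvHelperB arr target searchingLeft (mid + 1) right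
      else pvHelperB arr target searchingLeft left (mid - 1)
    else
      if PySem.List.pyGetD arr mid 0 = target ∧ (mid = (arr.length : Int) - 1 ∨ PySem.List.pyGetD arr (mid + 1) 0 ≠ target) then mid
      else if PySem.List.pyGetD arr mid 0 ≤ target then pvHelperB arr target searchingLeft (mid + 1) right
      else pvHelperB arr target searchingLeft left (mid - 1)
termination_by (right + 1 - left).toNat
decreasing_by
  all_goals
    have hb := PySem.Int.floordiv_two_mid_bounds (show left ≤ right by omega)
    omega

def calcRangeBorder_alt (arr : List Int) (target : Int) (searchingLeft : Bool) : Int :=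
  pvHelperB arr target searchingLeft 0 ((arr.length : Int) - 1)

-- ===== PRECONDITION & SPEC =====
def Spec_calcRangeBorder (arr : List Int) (target : Int) (searchingLeft : Bool) (out : Int) : Prop := out = calcRangeBorder_alt arr target searchingLeft
instance (arr : List Int) (target : Int) (searchingLeft : Bool) (out : Int) : Decidable (Spec_calcRangeBorder arr target searchingLeft out) := by unfold Spec_calcRangeBorder; infer_instance

-- ===== CLAIM (what is proved, stated in full; the proofs are below) =====
def Claim_equal_calcRangeBorder : Prop := ∀ (arr : List Int) (target : Int) (searchingLeft : Bool), Dom_calcRangeBorder arr target searchingLeft → Spec_calcRangeBorder arr target searchingLeft (calcRangeBorder arr target searchingLeft)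

-- ===== LEMMAS AND PROOFS =====
lemma pvLoopA_eq_helperB (arr : List Int) (target : Int) (searchingLeft : Bool) :
    ∀ (fuel : Nat) (left right : Int), right + 1 - left < fuel →
      pvLoopA arr target searchingLeft fuel left right = pvHelperB arr target searchingLeft left right := by
  intro fuel
  induction fuel with
  | zero =>
    intro left right h
    rw [pvHelperB]
    simp only [pvLoopA, dif_pos (show left > right by omega)]
  | succ n ih =>
    intro left right h
    rw [pvHelperB]
    by_cases hlr : left ≤ right
    · have hb := PySem.Int.floordiv_two_mid_bounds (show left ≤ right from hlr)
      cases searchingLeft <;>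
        simp only [pvLoopA, if_pos hlr, if_true, if_false, Bool.false_eq_true,
          dif_neg (show ¬ left > right by omega)] <;>
        split_ifs <;>
        first
        | rfl
        | (apply ih; omega)
    · simp only [pvLoopA, if_neg hlr, dif_pos (show left > right by omega)]

-- ===== VERDICT (by name: the statement is the Claim_ definition above) =====
theorem calcRangeBorder_spec : Claim_equal_calcRangeBorder := by
  intro arr target searchingLeft _
  unfold Spec_calcRangeBorder calcRangeBorder calcRangeBorder_alt
  exact pvLoopA_eq_helperB arr target searchingLeft (arr.length + 1) 0 ((arr.length : Int) - 1) (by omega)
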